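-- pv_equiv track=rewrite | github.com/fschatbot/Advent-Calendar-Python | 2017/6/runner.py | redistribute_until_loop
-- ===== SOURCE A (Python) =====
-- def redistribute_until_loop(rect_block):
-- 	occurances = []
-- 	while rect_block not in occurances:
-- 		# If not then append the block in the list
-- 		# we are creating a copy because if we change the rect_block later it will also change the one in the list
-- 		occurances.append(rect_block.copy())
-- 		# Balance the recent block
-- 		# Get the largest block
-- 		# Get the index of the first largest number instance
-- 		# Set the index to 0
-- 		num = max(rect_block)
-- 		index = rect_block.index(num)
-- 		rect_block[index] = 0
-- 		# Distribute the number to the rest of the list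
-- 		while num > 0:
-- 			# If there is number to distribute than increase the index
-- 			# Add the 1 to the index and decrease the amount to give
-- 			index = (index + 1) % (len(rect_block))
-- 			rect_block[index] += 1
-- 			num -= 1
-- 	# Now we add the rect_block to the occurances list to be used in part2
-- 	occurances.append(rect_block)
-- 	return occurances
-- ===== SOURCE B (Python) =====
-- def redistribute_until_loop(rect_block):
-- 	occurances = []
-- 	seen = set()
-- 	n = len(rect_block)
-- 	state = tuple(rect_block)
-- 	while state not in seen:
-- 		seen.add(state)
-- 		occurances.append(list(state))
-- 		num = max(state)
-- 		index = state.index(num)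
-- 		if num > 0:
-- 			base, rem = divmod(num, n)
-- 			state = tuple(
-- 				(0 if j == index else state[j])
-- 				+ base
-- 				+ (1 if 1 <= (j - index) % n <= rem else 0)
-- 				for j in range(n)
-- 			)
-- 		else:
-- 			state = state[:index] + (0,) + state[index + 1:]
-- 	occurances.append(list(state))
-- 	return occurances
-- ===== Notes on version B (the rewrite author's own statement) =====
-- stated objective: alternative
-- what changed: B replaces A's one-unit-at-a-time round-robin inner while loop by a closed-form divmod redistribution (each cell gets num // n, the num % n cells after the maximum get one extra) and replaces A's linear scan of the whole history list ('rect_block not in occurances') by a hash-set membership test on tuple states; unlike A it does not mutate the argument.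
-- outside the precondition, e.g. on redistribute_until_loop([]): A raises ValueError, B raises ValueError
import Mathlib
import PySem

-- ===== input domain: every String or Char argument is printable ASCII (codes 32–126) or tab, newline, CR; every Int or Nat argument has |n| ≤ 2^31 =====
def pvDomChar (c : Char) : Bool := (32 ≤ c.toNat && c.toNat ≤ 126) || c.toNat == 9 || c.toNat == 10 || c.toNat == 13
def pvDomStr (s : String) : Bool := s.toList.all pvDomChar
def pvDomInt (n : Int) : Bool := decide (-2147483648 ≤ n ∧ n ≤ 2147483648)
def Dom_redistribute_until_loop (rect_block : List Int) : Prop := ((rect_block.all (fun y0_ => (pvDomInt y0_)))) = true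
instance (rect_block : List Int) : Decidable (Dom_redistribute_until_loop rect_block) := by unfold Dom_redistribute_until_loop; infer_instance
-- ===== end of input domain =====

-- B replaces A's one-unit-at-a-time round-robin inner loop by a closed-form divmod
-- redistribution (each cell gets base = num // n, cells at offsets 1..num % n one extra)
-- and replaces A's linear scan of the whole history ('rect_block not in occurances') by a
-- hash-set membership test on tuple states. Python A mutates the argument list in place and
-- B does not; the equivalence proved here is about the RETURN value. The outer while loop is
-- ported with an explicit fuel counter (identical in both ports) that is large enough for
-- the loop's pigeonhole termination bound.

-- ===== PORT A =====

-- fuel bound for the outer 'while rect_block not in occurances' loop (shared loop plumbing,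
-- identical in both ports; generous pigeonhole bound on the number of distinct states)
def pvFuel (blk : List Int) : Nat :=
  ((blk.length + 2) * ((blk.map Int.natAbs).sum + 2)) ^ blk.length + 3

-- A's inner 'while num > 0' loop: hand one unit to the next cell, round robin
def pyDistrib (num : Int) (index : Nat) (xs : List Int) : List Int :=
  if h : 0 < num then
    let index' := (index + 1) % xs.length
    pyDistrib (num - 1) index' (xs.set index' (xs.getD index' 0 + 1))
  else xs
termination_by num.toNat
decreasing_by omega

-- A's outer loop
def pyLoopA (fuel : Nat) (occ : List (List Int)) (blk : List Int) : List (List Int) :=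
  match fuel with
  | 0 => occ ++ [blk]
  | f + 1 =>
    if blk ∈ occ then occ ++ [blk]
    else
      match PySem.List.max? blk (fun y => y) with
      | none => occ ++ [blk]   -- Python raises ValueError here (max of empty list); excluded by Pre_
      | some num =>
        match PySem.List.index? blk num with
        | none => occ ++ [blk] -- unreachable: the max is a member
        | some idx => pyLoopA f (occ ++ [blk]) (pyDistrib num idx (blk.set idx 0))

def redistribute_until_loop (rect_block : List Int) : List (List Int) :=
  pyLoopA (pvFuel rect_block) [] rect_block

-- ===== PORT B =====

-- B's closed-form redistribution step (the tuple comprehension in Source B)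
def pyStepB (n : Nat) (index : Nat) (num : Int) (blk : List Int) : List Int :=
  let base := PySem.Int.floordiv num n
  let rem := PySem.Int.mod num n
  (PySem.List.pyRange 0 n 1).map (fun j =>
    (if j = (index : Int) then 0 else PySem.List.pyGetD blk j 0)
    + base
    + (if 1 ≤ PySem.Int.mod (j - index) n ∧ PySem.Int.mod (j - index) n ≤ rem then 1 else 0))

-- B's outer loop (n = len(rect_block) computed once; 'seen' is the Python set of tuple states;
-- 'state[:index] + (0,) + state[index+1:]' is ported as take/drop, exact for this 0 ≤ index < n)
def pyLoopB (fuel : Nat) (n : Nat) (seen : PySem.Set (List Int))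
    (occ : List (List Int)) (blk : List Int) : List (List Int) :=
  match fuel with
  | 0 => occ ++ [blk]
  | f + 1 =>
    if PySem.Set.contains seen blk then occ ++ [blk]
    else
      match PySem.List.max? blk (fun y => y) with
      | none => occ ++ [blk]   -- Python raises ValueError here (max of empty tuple); excluded by Pre_
      | some num =>
        match PySem.List.index? blk num with
        | none => occ ++ [blk] -- unreachable: the max is a member
        | some idx =>
          pyLoopB f n (PySem.Set.add seen blk) (occ ++ [blk])
            (if 0 < num then pyStepB n idx num blk
             else blk.take idx ++ [0] ++ blk.drop (idx + 1))

def redistribute_until_loop_alt (rect_block : List Int) : List (List Int) :=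
  pyLoopB (pvFuel rect_block) rect_block.length PySem.Set.empty [] rect_block

-- ===== PRECONDITION & SPEC =====
-- Pre_ excludes only the empty list, on which Python A raises ValueError (max of empty sequence).
def Pre_redistribute_until_loop (rect_block : List Int) : Prop := rect_block ≠ []
instance (rect_block : List Int) : Decidable (Pre_redistribute_until_loop rect_block) := by
  unfold Pre_redistribute_until_loop; infer_instance

def pvWitness_redistribute_until_loop : List Int := [0, 2, 7, 0]

def Spec_redistribute_until_loop (rect_block : List Int) (out : List (List Int)) : Prop := out = redistribute_until_loop_alt rect_block
instance (rect_block : List Int) (out : List (List Int)) : Decidable (Spec_redistribute_until_loop rect_block out) := by unfold Spec_redistribute_until_loop; infer_instance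

-- ===== CLAIM (what is proved, stated in full; the proofs are below) =====
def Claim_equal_redistribute_until_loop : Prop := ∀ (rect_block : List Int), Dom_redistribute_until_loop rect_block → Pre_redistribute_until_loop rect_block → Spec_redistribute_until_loop rect_block (redistribute_until_loop rect_block)

-- ===== LEMMAS AND PROOFS =====

-- hit count: how many of m round-robin units starting after position idx land on cell j
def pvHit (n idx j m : Nat) : Int :=
  (m / n : Nat) + (if 1 ≤ (j + n - idx) % n ∧ (j + n - idx) % n ≤ m % n then 1 else 0)

theorem pv_mod_small2 (a n : Nat) (_hn : 0 < n) (h2 : a < 2 * n) :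
    a % n = if a < n then a else a - n := by
  split_ifs with h
  · exact Nat.mod_eq_of_lt h
  · rw [Nat.mod_eq_sub_mod (le_of_not_gt h), Nat.mod_eq_of_lt (by omega)]

theorem pvHit_succ (n idx j m : Nat) (hn : 0 < n) (hidx : idx < n) (hj : j < n) :
    (if j = (idx + 1) % n then (1 : Int) else 0) + pvHit n ((idx + 1) % n) j m
      = pvHit n idx j (m + 1) := by
  have hr : m % n < n := Nat.mod_lt _ hn
  have hdiv1 : (m + 1) / n = m / n + (m % n + 1) / n := by
    have hm1 : m + 1 = n * (m / n) + (m % n + 1) := by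
      have := Nat.div_add_mod m n; omega
    rw [hm1, Nat.mul_add_div hn]
  have hmod1 : (m + 1) % n = (m % n + 1) % n := by
    have hm1 : m + 1 = n * (m / n) + (m % n + 1) := by
      have := Nat.div_add_mod m n; omega
    rw [hm1, Nat.mul_add_mod]
  have hmod2 : (m % n + 1) % n = if m % n + 1 < n then m % n + 1 else 0 := by
    rw [pv_mod_small2 _ _ hn (by omega)]; split_ifs <;> omega
  have hdiv2 : (m % n + 1) / n = if m % n + 1 < n then 0 else 1 := by
    split_ifs with h
    · exact Nat.div_eq_of_lt h
    · have : m % n + 1 = n := by omega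
      rw [this, Nat.div_self hn]
  by_cases hin : idx + 1 < n
  · have hidx1 : (idx + 1) % n = idx + 1 := Nat.mod_eq_of_lt hin
    rw [hidx1]
    unfold pvHit
    rw [hdiv1, hmod1, hmod2, hdiv2,
      pv_mod_small2 (j + n - idx) n hn (by omega),
      pv_mod_small2 (j + n - (idx + 1)) n hn (by omega)]
    split_ifs <;> push_cast <;> omega
  · have hidx1 : (idx + 1) % n = 0 := by
      have : idx + 1 = n := by omega
      rw [this, Nat.mod_self]
    rw [hidx1]
    unfold pvHit
    rw [hdiv1, hmod1, hmod2, hdiv2,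
      pv_mod_small2 (j + n - idx) n hn (by omega),
      pv_mod_small2 (j + n - 0) n hn (by omega)]
    split_ifs <;> push_cast <;> omega

theorem pyDistrib_nonpos (num : Int) (index : Nat) (xs : List Int) (h : ¬ 0 < num) :
    pyDistrib num index xs = xs := by
  rw [pyDistrib]; simp [h]

-- characterization of A's round-robin loop: cell j ends at xs[j] + pvHit
theorem pyDistrib_eq (m : Nat) : ∀ (idx : Nat) (xs : List Int), idx < xs.length →
    pyDistrib (m : Int) idx xs
      = xs.mapIdx (fun j x => x + pvHit xs.length idx j m) := by
  induction m with
  | zero =>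
    intro idx xs hidx
    rw [pyDistrib_nonpos _ _ _ (by omega)]
    apply List.ext_getElem (by simp)
    intro j h1 h2
    simp only [List.getElem_mapIdx, pvHit, Nat.zero_mod, Nat.zero_div]
    rw [if_neg (by omega)]
    simp
  | succ m ih =>
    intro idx xs hidx
    have hn : 0 < xs.length := by omega
    rw [pyDistrib]
    have hpos : (0 : Int) < ((m + 1 : Nat) : Int) := by positivity
    simp only [hpos, dif_pos]
    have hc : ((m + 1 : Nat) : Int) - 1 = (m : Nat) := by push_cast; ring
    rw [hc]
    set idx' := (idx + 1) % xs.length with hidx'def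
    have hidx' : idx' < xs.length := Nat.mod_lt _ hn
    have hlen : (xs.set idx' (xs.getD idx' 0 + 1)).length = xs.length := by simp
    rw [ih idx' _ (by rw [hlen]; exact hidx')]
    apply List.ext_getElem (by simp)
    intro j h1 h2
    have hj : j < xs.length := by simpa using h1
    simp only [List.getElem_mapIdx, List.length_set, List.getElem_set, List.getD_eq_getElem _ _ hidx']
    have hs := pvHit_succ xs.length idx j m hn hidx hj
    rw [← hidx'def] at hs
    rw [← hs]
    by_cases h : idx' = j
    · subst h
      rw [if_pos rfl, if_pos rfl]
      ring
    · rw [if_neg h, if_neg (fun hh => h hh.symm)]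
      ring

-- the two redistribution steps agree
theorem step_eq (blk : List Int) (num : Int) (idx : Nat)
    (hidx : idx < blk.length) :
    pyDistrib num idx (blk.set idx 0)
      = if 0 < num then pyStepB blk.length idx num blk else blk.set idx 0 := by
  split_ifs with hpos
  · have hn : 0 < blk.length := by omega
    have hnum : num = (num.toNat : Int) := by omega
    rw [hnum, pyDistrib_eq num.toNat idx _ (by simpa using hidx)]
    set m := num.toNat with hm
    apply List.ext_getElem
    · simp [pyStepB, PySem.List.length_pyRange_one]
    intro j h1 h2
    have hj : j < blk.length := by simpa using h1
    simp only [List.getElem_mapIdx, List.getElem_set, List.length_set, pyStepB,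
      List.getElem_map, PySem.List.getElem_pyRange_one, zero_add]
    have hget : PySem.List.pyGetD blk ((j : Nat) : Int) 0 = blk[j] := by
      rw [PySem.List.pyGetD_natCast]
      simp [List.getD_eq_getElem?_getD, List.getElem?_eq_getElem hj]
    have hfd : PySem.Int.floordiv ((m : Nat) : Int) ((blk.length : Nat) : Int)
        = ((m / blk.length : Nat) : Int) := PySem.Int.floordiv_natCast m blk.length
    have hmd : PySem.Int.mod ((m : Nat) : Int) ((blk.length : Nat) : Int)
        = ((m % blk.length : Nat) : Int) := PySem.Int.mod_natCast m blk.length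
    have hmod : PySem.Int.mod ((j : Int) - (idx : Int)) (blk.length : Int)
        = (((j + blk.length - idx) % blk.length : Nat) : Int) := by
      rw [PySem.Int.mod_eq_emod_of_pos (by exact_mod_cast hn)]
      have h : (j : Int) - (idx : Int)
          = ((j + blk.length - idx : Nat) : Int) - (blk.length : Int) := by
        push_cast [Nat.cast_sub (by omega : idx ≤ j + blk.length)]; ring
      rw [h, Int.sub_emod_right, Int.natCast_mod]
    rw [hget, hfd, hmd, hmod, pvHit]
    have hcast : (((j : Nat) : Int) = ((idx : Nat) : Int)) ↔ (idx = j) := by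
      constructor <;> intro h <;> omega
    by_cases hji : idx = j
    · simp only [hcast.mpr hji, if_pos, hji]
      split_ifs <;> push_cast <;> omega
    · rw [if_neg hji, if_neg (fun h => hji (hcast.mp h))]
      split_ifs <;> push_cast <;> omega
  · exact pyDistrib_nonpos _ _ _ hpos

theorem loop_eq (fuel : Nat) : ∀ (occ : List (List Int)) (blk : List Int) (n : Nat)
    (seen : PySem.Set (List Int)), n = blk.length → seen = occ →
    pyLoopA fuel occ blk = pyLoopB fuel n seen occ blk := by
  induction fuel with
  | zero => intro occ blk n seen _ _; rfl
  | succ f ih =>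
    intro occ blk n seen hn hseen
    rw [pyLoopA, pyLoopB]
    by_cases hmem : blk ∈ occ
    · subst hseen; simp [hmem]
    have hc : ¬ PySem.Set.contains seen blk = true := by
      rw [hseen]; exact fun h => hmem ((PySem.Set.contains_iff _ _).mp h)
    simp only [hmem, hc, if_false]
    cases hmax : PySem.List.max? blk (fun y => y) with
    | none => rfl
    | some num =>
      dsimp only
      cases hidx : PySem.List.index? blk num with
      | none => rfl
      | some idx =>
        dsimp only
        obtain ⟨hk, -, -⟩ := PySem.List.getElem_of_index?_eq_some hidx
        have hslice : blk.take idx ++ [0] ++ blk.drop (idx + 1) = blk.set idx 0 := by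
          rw [List.set_eq_take_append_cons_drop]; · simp; · omega
        rw [step_eq blk num idx hk, hn, ← hslice]
        have hadd : PySem.Set.add seen blk = occ ++ [blk] := by
          rw [hseen]
          simp [PySem.Set.add, PySem.Set.contains, hmem]
        apply ih _ _ _ _ _ hadd
        rw [hslice]
        split_ifs with hpos
        · simp [pyStepB, PySem.List.length_pyRange_one]
        · simp

-- ===== VERDICT (by name: the statement is the Claim_ definition above) =====
theorem redistribute_until_loop_spec : Claim_equal_redistribute_until_loop := by
  intro rect_block _ _
  unfold Spec_redistribute_until_loop redistribute_until_loop redistribute_until_loop_alt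
  exact loop_eq _ _ _ _ _ rfl rfl
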